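-- pv_equiv track=rewrite | github.com/chunghee-hwang/AlgorithmStudy | src/kakao/level2/friends_four_blocks.py | solution
-- ===== SOURCE A (Python) =====
-- from collections import defaultdict
--
-- def solution(m, n, board):
--     answer = 0
--     deleted = defaultdict(set)
--     new_board = defaultdict(list)
--     for x in range(n):
--         for b in board:
--             new_board[x].append(b[x])
--     while True:
--         y = 0
--         while y < m - 1:
--             x = 0
--             while x < n - 1:
--                 if ' ' != new_board[x][y] == new_board[x][y + 1] == new_board[x + 1][y] == new_board[x + 1][y + 1]:
--                     deleted[x] |= {y, y + 1}
--                     deleted[x + 1] |= {y, y + 1}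
--                 x += 1
--             y += 1
--         if not deleted:
--             break
--         for x in range(n):
--             ys = deleted[x]
--             len_ys = len(ys)
--             answer += len_ys
--             for y in ys:
--                 new_board[x][y] = '?'
--             new_board[x] = list(filter(lambda k: k != '?', new_board[x]))
--             for _ in range(len_ys):
--                 new_board[x].insert(0, ' ')
--         deleted.clear()
--     return answer
-- ===== SOURCE B (Python) =====
-- def solution(m, n, board):
--     def block(g, r, c):
--         if r < 0 or c < 0 or r >= m - 1 or c >= n - 1:
--             return False
--         ch = g[r][c]
--         return ch != ' ' and ch == g[r][c + 1] == g[r + 1][c] == g[r + 1][c + 1]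
--
--     def cleared(g, r, c):
--         return block(g, r, c) or block(g, r - 1, c) or block(g, r, c - 1) or block(g, r - 1, c - 1)
--
--     def cascade(g):
--         h = len(g)
--         k = 0
--         cols = []
--         for c in range(n):
--             kept = [g[r][c] for r in range(h) if not cleared(g, r, c)]
--             k += h - len(kept)
--             cols.append([' '] * (h - len(kept)) + kept)
--         if k == 0:
--             return 0
--         return k + cascade([[cols[c][r] for c in range(n)] for r in range(h)])
--
--     return cascade([list(row)[:n] for row in board])
-- ===== Notes on version B (the rewrite author's own statement) =====
-- stated objective: alternative
-- what changed: B drops A's mark-set/sweep bookkeeping entirely: a cell is cleared iff a local per-cell predicate holds (one of the four 2x2 blocks covering it is monochrome non-space), and each cascade functionally rebuilds the grid from per-column keep-lists in a pure recursion, instead of A's transposed column dict with accumulated per-column deleted-row sets, '?'-sentinel marking, filter and insert-at-front gravity inside a while loop.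
-- outside the precondition, e.g. on solution(4, 4, ['b b?', 'a ?b', ' aaa', '?baa', 'aabb']): A returns 8, B returns 4; on solution(2, 2, ['?a', '?a']): A returns 0, B returns 0; on solution(3, 2, ['  ', '  ']): A returns 0, B returns 0
import Mathlib
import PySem

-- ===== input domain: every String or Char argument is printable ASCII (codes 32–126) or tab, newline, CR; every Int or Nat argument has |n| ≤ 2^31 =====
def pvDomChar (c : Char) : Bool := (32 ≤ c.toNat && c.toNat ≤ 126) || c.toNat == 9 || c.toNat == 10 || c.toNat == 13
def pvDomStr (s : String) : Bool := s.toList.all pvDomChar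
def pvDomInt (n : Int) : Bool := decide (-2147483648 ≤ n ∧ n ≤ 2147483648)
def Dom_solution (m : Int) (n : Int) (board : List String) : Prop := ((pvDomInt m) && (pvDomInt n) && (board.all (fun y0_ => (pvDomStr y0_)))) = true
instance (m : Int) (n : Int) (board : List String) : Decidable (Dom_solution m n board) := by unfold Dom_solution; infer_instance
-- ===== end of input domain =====

-- B replaces A's mark-set/sweep with a local per-cell cleared-predicate (one of the four 2x2
-- blocks covering the cell matches) and a pure recursion rebuilding the grid per cascade;
-- objective: alternative.

-- ===== PORT A =====
-- A: transpose into a defaultdict of columns.  b[x] read with a default — in range under Pre_solution.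
def pvBuildA (n : Int) (board : List String) : PySem.Dict Int (List Char) :=
  (PySem.List.pyRange 0 n 1).foldl
    (fun d x => board.foldl
      (fun d b => d.insert x ((d.getD x []) ++ [PySem.List.pyGetD b.toList x ' '])) d)
    PySem.Dict.empty

-- Python's chained comparison ' ' != nb[x][y] == nb[x][y+1] == nb[x+1][y] == nb[x+1][y+1];
-- list reads are total with a default — in range under Pre_solution wherever the chain reads them.
def pvCondA (nb : PySem.Dict Int (List Char)) (y x : Int) : Bool :=
  PySem.List.pyGetD (nb.getD x []) y ' ' != ' ' &&
  PySem.List.pyGetD (nb.getD x []) y ' ' == PySem.List.pyGetD (nb.getD x []) (y+1) ' ' &&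
  PySem.List.pyGetD (nb.getD x []) (y+1) ' ' == PySem.List.pyGetD (nb.getD (x+1) []) y ' ' &&
  PySem.List.pyGetD (nb.getD (x+1) []) y ' ' == PySem.List.pyGetD (nb.getD (x+1) []) (y+1) ' '

def pvMarkA (m n : Int) (nb : PySem.Dict Int (List Char)) : PySem.Dict Int (PySem.Set Int) :=
  (PySem.List.pyRange 0 (m-1) 1).foldl (fun del y =>
    (PySem.List.pyRange 0 (n-1) 1).foldl (fun del x =>
      if pvCondA nb y x then
        let del1 := del.insert x (PySem.Set.add (PySem.Set.add (del.getD x PySem.Set.empty) y) (y+1))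
        del1.insert (x+1) (PySem.Set.add (PySem.Set.add (del1.getD (x+1) PySem.Set.empty) y) (y+1))
      else del) del) PySem.Dict.empty

-- answer += len(ys); write '?' at the marked rows; filter them out; insert ' ' at the top len(ys) times
def pvClearA (n : Int) (del : PySem.Dict Int (PySem.Set Int))
    (st : Int × PySem.Dict Int (List Char)) : Int × PySem.Dict Int (List Char) :=
  (PySem.List.pyRange 0 n 1).foldl (fun st x =>
    let ys : PySem.Set Int := del.getD x PySem.Set.empty
    let marked := ys.foldl (fun col y => PySem.List.pySetD col y '?') (st.2.getD x [])
    let fcol := marked.filter (fun k => k != '?')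
    let newcol := (List.range ys.length).foldl (fun col _ => PySem.List.insert col 0 ' ') fcol
    (st.1 + (ys.length : Int), st.2.insert x newcol)) st

-- 'while True' of A, fuel-guarded (fuel only makes the recursion structural; it is never exhausted
-- before the break on the inputs the claim covers)
def pvLoopA (m n : Int) : Nat → Int → PySem.Dict Int (List Char) → Int
  | 0, ans, _ => ans
  | fuel+1, ans, nb =>
    let del := pvMarkA m n nb
    if del.items = [] then ans
    else
      let st := pvClearA n del (ans, nb)
      pvLoopA m n fuel st.1 st.2

def solution (m : Int) (n : Int) (board : List String) : Int :=
  pvLoopA m n (board.length * n.toNat + 1) 0 (pvBuildA n board)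

-- ===== PORT B =====
-- B: row-major grid; the chained comparison of block(); reads total with a default (in range under Pre_solution)
def pvCondB (g : List (List Char)) (r c : Int) : Bool :=
  PySem.List.pyGetD (PySem.List.pyGetD g r []) c ' ' != ' ' &&
  PySem.List.pyGetD (PySem.List.pyGetD g r []) c ' ' == PySem.List.pyGetD (PySem.List.pyGetD g r []) (c+1) ' ' &&
  PySem.List.pyGetD (PySem.List.pyGetD g r []) (c+1) ' ' == PySem.List.pyGetD (PySem.List.pyGetD g (r+1) []) c ' ' &&
  PySem.List.pyGetD (PySem.List.pyGetD g (r+1) []) c ' ' == PySem.List.pyGetD (PySem.List.pyGetD g (r+1) []) (c+1) ' '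

-- block(g, r, c): the range guard, then the monochrome 2x2 test
def pvBlockB (m n : Int) (g : List (List Char)) (r c : Int) : Bool :=
  if r < 0 || c < 0 || m - 1 ≤ r || n - 1 ≤ c then false else pvCondB g r c

-- cleared(g, r, c): some 2x2 block covering the cell matches
def pvClearedB (m n : Int) (g : List (List Char)) (r c : Int) : Bool :=
  pvBlockB m n g r c || pvBlockB m n g (r-1) c || pvBlockB m n g r (c-1) || pvBlockB m n g (r-1) (c-1)

-- kept = [g[r][c] for r in range(h) if not cleared(g, r, c)]
def pvKeepB (m n : Int) (g : List (List Char)) (c : Int) : List Char :=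
  ((List.range g.length).filter (fun r : Nat => !(pvClearedB m n g (r : Int) c))).map
    (fun r : Nat => PySem.List.pyGetD (PySem.List.pyGetD g (r : Int) []) c ' ')

-- one cascade pass: per column the cleared count and the compacted new column
def pvPassB (m n : Int) (g : List (List Char)) : Int × List (List Char) :=
  (PySem.List.pyRange 0 n 1).foldl (fun st c =>
    let kept := pvKeepB m n g c
    (st.1 + ((g.length - kept.length : Nat) : Int),
     st.2 ++ [List.replicate (g.length - kept.length) ' ' ++ kept]))
    ((0 : Int), ([] : List (List Char)))

-- [[cols[c][r] for c in range(n)] for r in range(h)]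
def pvRebuildB (n : Int) (h : Nat) (cols : List (List Char)) : List (List Char) :=
  (List.range h).map (fun r : Nat => (PySem.List.pyRange 0 n 1).map
    (fun c => PySem.List.pyGetD (PySem.List.pyGetD cols c []) (r : Int) ' '))

-- cascade(g), fuel-guarded (the fuel only makes the recursion structural; each pass with k > 0
-- removes cells, so it is never exhausted on the inputs the claim covers)
def pvCascadeB (m n : Int) : Nat → List (List Char) → Int
  | 0, _ => 0
  | fuel+1, g =>
    let st := pvPassB m n g
    if st.1 = 0 then 0 else st.1 + pvCascadeB m n fuel (pvRebuildB n g.length st.2)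

def solution_alt (m : Int) (n : Int) (board : List String) : Int :=
  pvCascadeB m n (board.length * n.toNat + 1)
    (board.map (fun row => PySem.List.slice row.toList none (some n)))

-- ===== PRECONDITION & SPEC =====
-- Pre_ excludes (a) dimension mismatches on which A raises IndexError (a row shorter than n, or a
-- board shorter than m when a 2x2 scan happens) — a few all-space mismatched boards return 0 in both
-- programs but are excluded with them — and (b) boards containing '?', A's internal deletion
-- sentinel, on which stray '?' cells are silently dropped during compaction so A miscounts or raises.
def Pre_solution (m : Int) (n : Int) (board : List String) : Prop :=
  (0 < n → ∀ b ∈ board, n ≤ (b.toList.length : Int)) ∧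
  (2 ≤ m → 2 ≤ n → (m ≤ (board.length : Int) ∧ ∀ b ∈ board, '?' ∉ b.toList))
instance (m : Int) (n : Int) (board : List String) : Decidable (Pre_solution m n board) := by
  unfold Pre_solution; infer_instance

def pvWitness_solution : Int × Int × List String := (3, 2, ["ab", "aa", "aa"])

def Spec_solution (m : Int) (n : Int) (board : List String) (out : Int) : Prop := out = solution_alt m n board
instance (m : Int) (n : Int) (board : List String) (out : Int) : Decidable (Spec_solution m n board out) := by unfold Spec_solution; infer_instance

-- ===== CLAIM (what is proved, stated in full; the proofs are below) =====
def Claim_equal_solution : Prop := ∀ (m : Int) (n : Int) (board : List String), Dom_solution m n board → Pre_solution m n board → Spec_solution m n board (solution m n board)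

-- ===== LEMMAS AND PROOFS =====

-- the column of `g` at x, as read through pyGetD
def pvColAt (g : List (List Char)) (x : Int) : List Char :=
  g.map (fun row => PySem.List.pyGetD row x ' ')

-- invariant: A's column dict agrees with B's rows on every column 0 ≤ x < n
def pvColEq (n : Int) (nb : PySem.Dict Int (List Char)) (g : List (List Char)) : Prop :=
  ∀ x : Int, 0 ≤ x → x < n → nb.getD x [] = pvColAt g x

-- side facts about B's grid that the cascade preserves
def pvGood (m n : Int) (h : Nat) (g : List (List Char)) : Prop :=
  g.length = h ∧ m ≤ (h : Int) ∧ (∀ row ∈ g, n ≤ (row.length : Int)) ∧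
  (∀ x : Int, 0 ≤ x → x < n → '?' ∉ pvColAt g x)

-- the cleared predicate read on A's side (same anchors, pvCondA instead of pvCondB)
def pvAnchA (m n : Int) (nb : PySem.Dict Int (List Char)) (y x : Int) : Bool :=
  if y < 0 || x < 0 || m - 1 ≤ y || n - 1 ≤ x then false else pvCondA nb y x

def pvClearedA (m n : Int) (nb : PySem.Dict Int (List Char)) (y x : Int) : Bool :=
  pvAnchA m n nb y x || pvAnchA m n nb (y-1) x || pvAnchA m n nb y (x-1) || pvAnchA m n nb (y-1) (x-1)

-- structural invariants of A's deleted-dict maintained by the mark fold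
def pvInv (m n : Int) (del : PySem.Dict Int (PySem.Set Int)) : Prop :=
  (∀ x : Int, (del.getD x PySem.Set.empty).Nodup) ∧
  (∀ y x : Int, y ∈ del.getD x PySem.Set.empty → 0 ≤ y ∧ y < m ∧ 0 ≤ x ∧ x < n) ∧
  (del.items = [] ↔ ∀ y x : Int, y ∉ del.getD x PySem.Set.empty)

theorem pvColAt_get (g : List (List Char)) (x y : Int) :
    PySem.List.pyGetD (pvColAt g x) y ' ' =
    PySem.List.pyGetD (PySem.List.pyGetD g y []) x ' ' := by
  have h := PySem.List.pyGetD_map (fun row => PySem.List.pyGetD row x ' ') g y []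
  simpa [pvColAt, PySem.List.pyGetD, PySem.List.pyGet?] using h

theorem pvChain4 (a b c d e : Char) :
    (a != e && (a == b) && (b == c) && (c == d)) = (a != e && (a == c) && (c == b) && (b == d)) := by
  rw [Bool.eq_iff_iff]
  simp only [Bool.and_eq_true, beq_iff_eq, bne_iff_ne]
  constructor <;> rintro ⟨⟨⟨h1, rfl⟩, rfl⟩, rfl⟩ <;> exact ⟨⟨⟨h1, rfl⟩, rfl⟩, rfl⟩

theorem pvCond_eq (n : Int) (nb : PySem.Dict Int (List Char)) (g : List (List Char))
    (hce : pvColEq n nb g) (y x : Int) (hx0 : 0 ≤ x) (hx1 : x + 1 < n) :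
    pvCondA nb y x = pvCondB g y x := by
  have e1 : nb.getD x [] = pvColAt g x := hce x hx0 (by omega)
  have e2 : nb.getD (x+1) [] = pvColAt g (x+1) := hce (x+1) (by omega) hx1
  simp only [pvCondA, pvCondB, e1, e2, pvColAt_get]
  apply pvChain4

theorem pvCleared_eq (m n : Int) (nb : PySem.Dict Int (List Char)) (g : List (List Char))
    (hce : pvColEq n nb g) (y x : Int) :
    pvClearedA m n nb y x = pvClearedB m n g y x := by
  have hb : ∀ y' x' : Int, pvAnchA m n nb y' x' = pvBlockB m n g y' x' := by
    intro y' x'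
    unfold pvAnchA pvBlockB
    split
    · rfl
    · rename_i h
      simp only [Bool.or_eq_true, decide_eq_true_eq, not_or] at h
      exact pvCond_eq n nb g hce y' x' (by omega) (by omega)
  simp only [pvClearedA, pvClearedB, hb]

theorem pvInsert_items_ne_nil {ν : Type} (d : PySem.Dict Int ν) (k : Int) (v : ν) :
    (d.insert k v).items ≠ [] := by
  rw [PySem.Dict.items_insert]
  split
  · rename_i hc
    intro h
    have hil : d.items = [] := by simpa using h
    have hk : k ∈ d.keys := (PySem.Dict.contains_iff_mem_keys d k).mp hc
    rw [show d.keys = d.items.map (·.1) from rfl, hil] at hk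
    simp at hk
  · simp

-- one matched block: membership, invariants
theorem pvMarkStep (m n : Int) (y x : Int)
    (hy0 : 0 ≤ y) (hy1 : y < m - 1) (hx0 : 0 ≤ x) (hx1 : x < n - 1)
    (del : PySem.Dict Int (PySem.Set Int)) (hinv : pvInv m n del) :
    pvInv m n
      ((del.insert x (PySem.Set.add (PySem.Set.add (del.getD x PySem.Set.empty) y) (y+1))).insert (x+1)
        (PySem.Set.add (PySem.Set.add ((del.insert x (PySem.Set.add (PySem.Set.add (del.getD x PySem.Set.empty) y) (y+1))).getD (x+1) PySem.Set.empty) y) (y+1))) ∧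
    (∀ y0 x0 : Int,
      y0 ∈ ((del.insert x (PySem.Set.add (PySem.Set.add (del.getD x PySem.Set.empty) y) (y+1))).insert (x+1)
        (PySem.Set.add (PySem.Set.add ((del.insert x (PySem.Set.add (PySem.Set.add (del.getD x PySem.Set.empty) y) (y+1))).getD (x+1) PySem.Set.empty) y) (y+1))).getD x0 PySem.Set.empty
      ↔ (y0 ∈ del.getD x0 PySem.Set.empty ∨ ((y0 = y ∨ y0 = y + 1) ∧ (x0 = x ∨ x0 = x + 1)))) := by
  obtain ⟨hnd, hbnd, _⟩ := hinv
  have hne : (x : Int) + 1 ≠ x := by omega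
  have hS : ∀ (s : PySem.Set Int) (y' : Int),
      y' ∈ PySem.Set.add (PySem.Set.add s y) (y+1) ↔ (y' ∈ s ∨ y' = y ∨ y' = y + 1) := by
    intro s y'; simp only [PySem.Set.mem_add]; tauto
  have hmem : ∀ y0 x0 : Int,
      y0 ∈ ((del.insert x (PySem.Set.add (PySem.Set.add (del.getD x PySem.Set.empty) y) (y+1))).insert (x+1)
        (PySem.Set.add (PySem.Set.add ((del.insert x (PySem.Set.add (PySem.Set.add (del.getD x PySem.Set.empty) y) (y+1))).getD (x+1) PySem.Set.empty) y) (y+1))).getD x0 PySem.Set.empty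
      ↔ (y0 ∈ del.getD x0 PySem.Set.empty ∨ ((y0 = y ∨ y0 = y + 1) ∧ (x0 = x ∨ x0 = x + 1))) := by
    intro y0 x0
    simp only [PySem.Dict.getD_insert, if_neg hne]
    by_cases h1 : x0 = x + 1
    · rw [if_pos h1, hS, h1]
      constructor
      · rintro (h | rfl | rfl)
        · exact Or.inl h
        · exact Or.inr ⟨Or.inl rfl, Or.inr rfl⟩
        · exact Or.inr ⟨Or.inr rfl, Or.inr rfl⟩
      · rintro (h | ⟨hy, hx⟩)
        · exact Or.inl h
        · rcases hy with rfl | rfl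
          · exact Or.inr (Or.inl rfl)
          · exact Or.inr (Or.inr rfl)
    · rw [if_neg h1]
      by_cases h2 : x0 = x
      · rw [if_pos h2, hS, h2]
        constructor
        · rintro (h | rfl | rfl)
          · exact Or.inl h
          · exact Or.inr ⟨Or.inl rfl, Or.inl rfl⟩
          · exact Or.inr ⟨Or.inr rfl, Or.inl rfl⟩
        · rintro (h | ⟨hy, hx⟩)
          · exact Or.inl h
          · rcases hy with rfl | rfl
            · exact Or.inr (Or.inl rfl)
            · exact Or.inr (Or.inr rfl)
      · rw [if_neg h2]
        constructor
        · exact fun h => Or.inl h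
        · rintro (h | ⟨_, hx⟩)
          · exact h
          · rcases hx with rfl | rfl
            · exact absurd rfl h2
            · exact absurd rfl h1
  refine ⟨⟨?_, ?_, ?_⟩, hmem⟩
  · intro x0
    simp only [PySem.Dict.getD_insert, if_neg hne]
    split
    · exact PySem.Set.nodup_add _ _ (PySem.Set.nodup_add _ _ (hnd _))
    · split
      · exact PySem.Set.nodup_add _ _ (PySem.Set.nodup_add _ _ (hnd _))
      · exact hnd x0
  · intro y0 x0 hm
    rcases (hmem y0 x0).mp hm with h | ⟨hy', hx'⟩
    · exact hbnd y0 x0 h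
    · constructor
      · rcases hy' with rfl | rfl <;> omega
      · refine ⟨by rcases hy' with rfl | rfl <;> omega, ?_⟩
        rcases hx' with rfl | rfl <;> omega
  · constructor
    · intro h; exact absurd h (pvInsert_items_ne_nil _ _ _)
    · intro h
      exfalso
      have := (hmem y (x+1)).mpr (Or.inr ⟨Or.inl rfl, Or.inr rfl⟩)
      exact h y (x+1) this

-- inner fold (fixed y): membership characterization + invariants
theorem pvMarkInner (m n : Int) (nb : PySem.Dict Int (List Char))
    (y : Int) (hy0 : 0 ≤ y) (hy1 : y < m - 1) :
    ∀ (xs : List Int), (∀ x ∈ xs, 0 ≤ x ∧ x < n - 1) →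
    ∀ (del : PySem.Dict Int (PySem.Set Int)), pvInv m n del →
    pvInv m n (xs.foldl (fun del x =>
        if pvCondA nb y x then
          let del1 := del.insert x (PySem.Set.add (PySem.Set.add (del.getD x PySem.Set.empty) y) (y+1))
          del1.insert (x+1) (PySem.Set.add (PySem.Set.add (del1.getD (x+1) PySem.Set.empty) y) (y+1))
        else del) del) ∧
    (∀ y0 x0 : Int,
      y0 ∈ (xs.foldl (fun del x =>
        if pvCondA nb y x then
          let del1 := del.insert x (PySem.Set.add (PySem.Set.add (del.getD x PySem.Set.empty) y) (y+1))
          del1.insert (x+1) (PySem.Set.add (PySem.Set.add (del1.getD (x+1) PySem.Set.empty) y) (y+1))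
        else del) del).getD x0 PySem.Set.empty
      ↔ (y0 ∈ del.getD x0 PySem.Set.empty ∨
         ∃ x' ∈ xs, pvCondA nb y x' = true ∧ (y0 = y ∨ y0 = y + 1) ∧ (x0 = x' ∨ x0 = x' + 1))) := by
  intro xs
  induction xs with
  | nil =>
    intro _ del hinv
    exact ⟨hinv, fun y0 x0 => by simp⟩
  | cons a as ih =>
    intro hxs del hinv
    have ha := hxs a List.mem_cons_self
    simp only [List.foldl_cons]
    by_cases hc : pvCondA nb y a = true
    · rw [if_pos hc]
      have hstep := pvMarkStep m n y a hy0 hy1 ha.1 ha.2 del hinv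
      obtain ⟨hinv', hrec⟩ := ih (fun x hx => hxs x (List.mem_cons_of_mem _ hx)) _ hstep.1
      refine ⟨hinv', fun y0 x0 => ?_⟩
      rw [hrec y0 x0, hstep.2 y0 x0]
      constructor
      · rintro ((h | ⟨hy, hx⟩) | ⟨x', hx', hcx, hyy, hxx⟩)
        · exact Or.inl h
        · exact Or.inr ⟨a, List.mem_cons_self, hc, hy, hx⟩
        · exact Or.inr ⟨x', List.mem_cons_of_mem _ hx', hcx, hyy, hxx⟩
      · rintro (h | ⟨x', hx', hcx, hyy, hxx⟩)
        · exact Or.inl (Or.inl h)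
        · rcases List.mem_cons.mp hx' with rfl | hmem
          · exact Or.inl (Or.inr ⟨hyy, hxx⟩)
          · exact Or.inr ⟨x', hmem, hcx, hyy, hxx⟩
    · rw [if_neg hc]
      obtain ⟨hinv', hrec⟩ := ih (fun x hx => hxs x (List.mem_cons_of_mem _ hx)) _ hinv
      refine ⟨hinv', fun y0 x0 => ?_⟩
      rw [hrec y0 x0]
      constructor
      · rintro (h | ⟨x', hx', hcx, hyy, hxx⟩)
        · exact Or.inl h
        · exact Or.inr ⟨x', List.mem_cons_of_mem _ hx', hcx, hyy, hxx⟩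
      · rintro (h | ⟨x', hx', hcx, hyy, hxx⟩)
        · exact Or.inl h
        · rcases List.mem_cons.mp hx' with rfl | hmem
          · exact absurd hcx hc
          · exact Or.inr ⟨x', hmem, hcx, hyy, hxx⟩

-- full mark fold: invariants + membership ↔ pvClearedA
theorem pvMark_char (m n : Int) (nb : PySem.Dict Int (List Char)) :
    pvInv m n (pvMarkA m n nb) ∧
    (∀ y0 x0 : Int, y0 ∈ (pvMarkA m n nb).getD x0 PySem.Set.empty ↔ pvClearedA m n nb y0 x0 = true) := by
  have hinit : pvInv m n PySem.Dict.empty := by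
    refine ⟨?_, ?_, ?_⟩
    · intro x; simp [PySem.Dict.getD_empty, PySem.Set.empty]
    · intro y x; simp [PySem.Dict.getD_empty, PySem.Set.empty]
    · constructor
      · intro _ y x; simp [PySem.Dict.getD_empty, PySem.Set.empty]
      · intro _; rfl
  have houter : ∀ (ys : List Int), (∀ y ∈ ys, 0 ≤ y ∧ y < m - 1) →
      ∀ del, pvInv m n del →
      pvInv m n (ys.foldl (fun del y => (PySem.List.pyRange 0 (n-1) 1).foldl (fun del x =>
          if pvCondA nb y x then
            let del1 := del.insert x (PySem.Set.add (PySem.Set.add (del.getD x PySem.Set.empty) y) (y+1))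
            del1.insert (x+1) (PySem.Set.add (PySem.Set.add (del1.getD (x+1) PySem.Set.empty) y) (y+1))
          else del) del) del) ∧
      (∀ y0 x0 : Int,
        y0 ∈ (ys.foldl (fun del y => (PySem.List.pyRange 0 (n-1) 1).foldl (fun del x =>
          if pvCondA nb y x then
            let del1 := del.insert x (PySem.Set.add (PySem.Set.add (del.getD x PySem.Set.empty) y) (y+1))
            del1.insert (x+1) (PySem.Set.add (PySem.Set.add (del1.getD (x+1) PySem.Set.empty) y) (y+1))
          else del) del) del).getD x0 PySem.Set.empty
        ↔ (y0 ∈ del.getD x0 PySem.Set.empty ∨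
           ∃ y' ∈ ys, ∃ x' ∈ PySem.List.pyRange 0 (n-1) 1,
             pvCondA nb y' x' = true ∧ (y0 = y' ∨ y0 = y' + 1) ∧ (x0 = x' ∨ x0 = x' + 1))) := by
    intro ys
    induction ys with
    | nil =>
      intro _ del hinv
      exact ⟨hinv, fun y0 x0 => by simp⟩
    | cons a as ih =>
      intro hys del hinv
      have ha := hys a List.mem_cons_self
      simp only [List.foldl_cons]
      obtain ⟨hinv1, hmem1⟩ := pvMarkInner m n nb a ha.1 ha.2 (PySem.List.pyRange 0 (n-1) 1)
        (fun x hx => by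
          have := PySem.List.mem_pyRange_one.mp hx
          exact ⟨this.1, this.2⟩) del hinv
      obtain ⟨hinv2, hmem2⟩ := ih (fun y hy => hys y (List.mem_cons_of_mem _ hy)) _ hinv1
      refine ⟨hinv2, fun y0 x0 => ?_⟩
      rw [hmem2 y0 x0, hmem1 y0 x0]
      constructor
      · rintro ((h | ⟨x', hx', hcx, hyy, hxx⟩) | ⟨y', hy', x', hx', hcx, hyy, hxx⟩)
        · exact Or.inl h
        · exact Or.inr ⟨a, List.mem_cons_self, x', hx', hcx, hyy, hxx⟩
        · exact Or.inr ⟨y', List.mem_cons_of_mem _ hy', x', hx', hcx, hyy, hxx⟩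
      · rintro (h | ⟨y', hy', x', hx', hcx, hyy, hxx⟩)
        · exact Or.inl (Or.inl h)
        · rcases List.mem_cons.mp hy' with rfl | hmem
          · exact Or.inl (Or.inr ⟨x', hx', hcx, hyy, hxx⟩)
          · exact Or.inr ⟨y', hmem, x', hx', hcx, hyy, hxx⟩
  obtain ⟨hinv, hmem⟩ := houter (PySem.List.pyRange 0 (m-1) 1)
    (fun y hy => by
      have := PySem.List.mem_pyRange_one.mp hy
      exact ⟨this.1, this.2⟩) _ hinit
  refine ⟨hinv, fun y0 x0 => ?_⟩
  unfold pvMarkA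
  rw [hmem y0 x0]
  have hemp : y0 ∉ (PySem.Dict.empty : PySem.Dict Int (PySem.Set Int)).getD x0 PySem.Set.empty := by
    simp [PySem.Dict.getD_empty, PySem.Set.empty]
  have hanch : ∀ y' x' : Int, pvAnchA m n nb y' x' = true ↔
      (0 ≤ y' ∧ y' < m - 1 ∧ 0 ≤ x' ∧ x' < n - 1 ∧ pvCondA nb y' x' = true) := by
    intro y' x'
    unfold pvAnchA
    split
    · rename_i h
      simp only [Bool.or_eq_true, decide_eq_true_eq] at h
      constructor
      · intro hf; exact absurd hf (by simp)
      · intro hf; omega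
    · rename_i h
      simp only [Bool.or_eq_true, decide_eq_true_eq, not_or] at h
      constructor
      · intro hf; exact ⟨by omega, by omega, by omega, by omega, hf⟩
      · intro hf; exact hf.2.2.2.2
  constructor
  · rintro (h | ⟨y', hy', x', hx', hcx, hyy, hxx⟩)
    · exact absurd h hemp
    · have hyb := PySem.List.mem_pyRange_one.mp hy'
      have hxb := PySem.List.mem_pyRange_one.mp hx'
      unfold pvClearedA
      simp only [Bool.or_eq_true]
      rcases hyy with rfl | rfl <;> rcases hxx with rfl | rfl
      · exact Or.inl (Or.inl (Or.inl ((hanch _ _).mpr ⟨hyb.1, hyb.2, hxb.1, hxb.2, hcx⟩)))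
      · exact Or.inl (Or.inr (by
          have : x' + 1 - 1 = x' := by omega
          rw [this]; exact (hanch _ _).mpr ⟨hyb.1, hyb.2, hxb.1, hxb.2, hcx⟩))
      · exact Or.inl (Or.inl (Or.inr (by
          have : y' + 1 - 1 = y' := by omega
          rw [this]; exact (hanch _ _).mpr ⟨hyb.1, hyb.2, hxb.1, hxb.2, hcx⟩)))
      · exact Or.inr (by
          have h1 : y' + 1 - 1 = y' := by omega
          have h2 : x' + 1 - 1 = x' := by omega
          rw [h1, h2]; exact (hanch _ _).mpr ⟨hyb.1, hyb.2, hxb.1, hxb.2, hcx⟩)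
  · intro hcl
    unfold pvClearedA at hcl
    simp only [Bool.or_eq_true] at hcl
    refine Or.inr ?_
    rcases hcl with ((h | h) | h) | h
    · obtain ⟨h1, h2, h3, h4, h5⟩ := (hanch _ _).mp h
      exact ⟨y0, PySem.List.mem_pyRange_one.mpr ⟨h1, h2⟩, x0,
        PySem.List.mem_pyRange_one.mpr ⟨h3, h4⟩, h5, Or.inl rfl, Or.inl rfl⟩
    · obtain ⟨h1, h2, h3, h4, h5⟩ := (hanch _ _).mp h
      exact ⟨y0 - 1, PySem.List.mem_pyRange_one.mpr ⟨h1, h2⟩, x0,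
        PySem.List.mem_pyRange_one.mpr ⟨h3, h4⟩, h5, Or.inr (by omega), Or.inl rfl⟩
    · obtain ⟨h1, h2, h3, h4, h5⟩ := (hanch _ _).mp h
      exact ⟨y0, PySem.List.mem_pyRange_one.mpr ⟨h1, h2⟩, x0 - 1,
        PySem.List.mem_pyRange_one.mpr ⟨h3, h4⟩, h5, Or.inl rfl, Or.inr (by omega)⟩
    · obtain ⟨h1, h2, h3, h4, h5⟩ := (hanch _ _).mp h
      exact ⟨y0 - 1, PySem.List.mem_pyRange_one.mpr ⟨h1, h2⟩, x0 - 1,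
        PySem.List.mem_pyRange_one.mpr ⟨h3, h4⟩, h5, Or.inr (by omega), Or.inr (by omega)⟩

theorem pvSelfMap (col : List Char) : col = (List.range col.length).map (fun r => col.getD r ' ') := by
  apply List.ext_getElem
  · simp
  · intro i h1 h2
    simp only [List.getElem_map, List.getElem_range]
    rw [List.getD_eq_getElem col ' ' (by simpa using h2)]

theorem pvPrependCons (k : Nat) (l : List Char) :
    (List.range k).foldl (fun col _ => ' ' :: col) l = List.replicate k ' ' ++ l := by
  induction k generalizing l with
  | zero => simp
  | succ k ih =>
    rw [List.range_succ, List.foldl_append]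
    simp only [List.foldl_cons, List.foldl_nil]
    rw [ih, List.replicate_succ, List.cons_append]

theorem pvMarked (ys : List Int) : ∀ (col : List Char), (∀ y ∈ ys, 0 ≤ y ∧ y < (col.length : Int)) →
    ys.foldl (fun col y => PySem.List.pySetD col y '?') col
    = (List.range col.length).map (fun (r : Nat) => if ((r : Int) ∈ ys) then '?' else col.getD r ' ') := by
  induction ys with
  | nil =>
    intro col _
    simp only [List.foldl_nil, List.not_mem_nil, if_false]
    exact pvSelfMap col
  | cons y ys ih =>
    intro col hb
    have hy := hb y List.mem_cons_self
    rw [List.foldl_cons, PySem.List.pySetD_of_nonneg col '?' hy.1]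
    rw [ih (col.set y.toNat '?') (by simpa using fun z hz => hb z (List.mem_cons_of_mem _ hz))]
    rw [List.length_set]
    apply List.map_congr_left
    intro r hr
    rw [List.mem_range] at hr
    by_cases h1 : (r : Int) ∈ ys
    · simp [h1, List.mem_cons]
    · by_cases h2 : (r : Int) = y
      · have hry : y.toNat = r := by omega
        have hlen : r < (col.set y.toNat '?').length := by simpa using hr
        simp only [List.mem_cons, h2, true_or, if_true, hry]
        split_ifs with hyys
        · rfl
        · rw [List.getD_eq_getElem _ ' ' (by simpa using hr), List.getElem_set]
          simp
      · have hne : y.toNat ≠ r := by omega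
        simp [h1, h2, List.mem_cons, List.getD_eq_getElem _ _ (by simpa using hr),
          List.getD_eq_getElem _ _ hr, List.getElem_set, hne]

theorem pvFcol (col : List Char) (ys : List Int) (hq : ∀ ch ∈ col, ch ≠ '?') :
    ((List.range col.length).map (fun (r : Nat) => if ((r : Int) ∈ ys) then '?' else col.getD r ' ')).filter (fun k => k != '?')
    = ((List.range col.length).filter (fun (r : Nat) => decide (¬((r : Int) ∈ ys)))).map (fun r => col.getD r ' ') := by
  rw [List.filter_map]
  rw [List.filter_congr (l := List.range col.length)
      (q := fun (r : Nat) => decide (¬((r : Int) ∈ ys))) ?_]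
  · apply List.map_congr_left
    intro r hr
    rw [List.mem_filter] at hr
    have hrng := List.mem_range.mp hr.1
    have : ¬ ((r : Int) ∈ ys) := by simpa using hr.2
    simp [this]
  · intro r hr
    have hrng := List.mem_range.mp hr
    by_cases h1 : (r : Int) ∈ ys
    · simp [h1]
    · have : col.getD r ' ' ∈ col := by
        rw [List.getD_eq_getElem _ _ hrng]; exact List.getElem_mem _
      simp only [Function.comp, h1, not_false_eq_true, decide_true, bne_iff_ne, ne_eq]
      simpa [List.getD] using hq _ this

theorem pvCount (h : Nat) (ys : List Int) (hnd : ys.Nodup)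
    (hb : ∀ y ∈ ys, 0 ≤ y ∧ y < (h : Int)) :
    ys.length ≤ h ∧
    ((List.range h).filter (fun (r : Nat) => decide (¬((r : Int) ∈ ys)))).length = h - ys.length := by
  have hP : ((List.range h).filter (fun (r : Nat) => decide ((r : Int) ∈ ys))).length = ys.length := by
    have hmap : (((List.range h).filter (fun (r : Nat) => decide ((r : Int) ∈ ys))).map
        (fun (r : Nat) => (r : Int))).Perm ys := by
      rw [List.perm_ext_iff_of_nodup]
      · intro a
        simp only [List.mem_map, List.mem_filter, List.mem_range, decide_eq_true_eq]
        constructor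
        · rintro ⟨r, ⟨_, hmem⟩, rfl⟩; exact hmem
        · intro ha
          have hbd := hb a ha
          exact ⟨a.toNat, ⟨by omega, by rwa [Int.toNat_of_nonneg hbd.1]⟩, Int.toNat_of_nonneg hbd.1⟩
      · exact (List.nodup_range.filter _).map (fun _ _ => by omega)
      · exact hnd
    have := hmap.length_eq
    simpa using this
  constructor
  · rw [← hP]
    calc ((List.range h).filter _).length ≤ (List.range h).length := List.length_filter_le _ _
    _ = h := List.length_range
  · have hsplit := List.length_eq_length_filter_add (l := List.range h)
        (fun (r : Nat) => decide ((r : Int) ∈ ys))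
    rw [List.length_range] at hsplit
    rw [List.filter_congr (q := fun (r : Nat) =>
        !(decide ((r : Int) ∈ ys))) (fun r _ => by simp)]
    omega

-- A's one-column clear result equals B's compacted column, and the counts agree
theorem pvNewColA (m n : Int) (h : Nat) (del : PySem.Dict Int (PySem.Set Int))
    (g : List (List Char))
    (hmem : ∀ y x : Int, y ∈ del.getD x PySem.Set.empty ↔ pvClearedB m n g y x = true)
    (hinv : pvInv m n del) (hg : pvGood m n h g) (x : Int) (hx0 : 0 ≤ x) (hxn : x < n) :
    ((del.getD x PySem.Set.empty).length : Int) = ((h - (pvKeepB m n g x).length : Nat) : Int) ∧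
    (List.range (del.getD x PySem.Set.empty).length).foldl (fun col _ => PySem.List.insert col 0 ' ')
      (((del.getD x PySem.Set.empty).foldl (fun col y => PySem.List.pySetD col y '?')
          (pvColAt g x)).filter (fun k => k != '?'))
    = List.replicate (h - (pvKeepB m n g x).length) ' ' ++ pvKeepB m n g x := by
  obtain ⟨hnd, hbnd, _⟩ := hinv
  obtain ⟨hlen, hmh, _, hnoq⟩ := hg
  set ys : PySem.Set Int := del.getD x PySem.Set.empty with hys
  set col := pvColAt g x with hcol
  have hlc : col.length = h := by rw [hcol, pvColAt, List.length_map, hlen]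
  have hb : ∀ y ∈ ys, 0 ≤ y ∧ y < (col.length : Int) := by
    intro y hy
    have := hbnd y x hy
    exact ⟨this.1, by rw [hlc]; omega⟩
  have hq : ∀ ch ∈ col, ch ≠ '?' := fun ch hch heq => hnoq x hx0 hxn (heq ▸ hch)
  have hcnt := pvCount col.length ys (hnd x) hb
  -- B's kept list is A's filtered column
  have hkeep : pvKeepB m n g x
      = ((List.range col.length).filter (fun (r : Nat) => decide (¬((r : Int) ∈ ys)))).map
          (fun r => col.getD r ' ') := by
    unfold pvKeepB
    rw [show g.length = col.length from (by rw [hlc, hlen])]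
    rw [List.filter_congr (q := fun (r : Nat) => decide (¬((r : Int) ∈ ys))) (fun r _ => by
      by_cases hc : pvClearedB m n g (r : Int) x = true
      · have hin : (r : Int) ∈ ys := (hmem (r : Int) x).mpr hc
        simp [hc, hin]
      · have hnin : (r : Int) ∉ ys := fun hmm => hc ((hmem (r : Int) x).mp hmm)
        have hcf : pvClearedB m n g (r : Int) x = false := by
          cases hcb : pvClearedB m n g (r : Int) x
          · rfl
          · exact absurd hcb hc
        simp [hcf, hnin])]
    apply List.map_congr_left
    intro r hr
    rw [List.mem_filter, List.mem_range] at hr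
    rw [← pvColAt_get g x (r : Int), ← hcol, PySem.List.pyGetD_natCast]
  have hkl : (pvKeepB m n g x).length = h - ys.length := by
    rw [hkeep, List.length_map, hcnt.2, hlc]
  have hyl : h - (pvKeepB m n g x).length = ys.length := by
    rw [hkl]
    have := hcnt.1
    rw [hlc] at this
    omega
  refine ⟨by rw [hyl], ?_⟩
  rw [pvMarked ys col hb, pvFcol col ys hq, ← hkeep, hyl]
  simp only [PySem.List.insert_zero]
  exact pvPrependCons _ _

-- A's clear fold, characterized (xs nodup; the dict is only read at unprocessed columns)
theorem pvClearA_char (n : Int) (del : PySem.Dict Int (PySem.Set Int)) :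
    ∀ (xs : List Int), xs.Nodup →
    ∀ (ans : Int) (d : PySem.Dict Int (List Char)),
    (xs.foldl (fun st x =>
      let ys : PySem.Set Int := del.getD x PySem.Set.empty
      let marked := ys.foldl (fun col y => PySem.List.pySetD col y '?') (st.2.getD x [])
      let fcol := marked.filter (fun k => k != '?')
      let newcol := (List.range ys.length).foldl (fun col _ => PySem.List.insert col 0 ' ') fcol
      (st.1 + (ys.length : Int), st.2.insert x newcol)) (ans, d)).1
      = ans + (xs.map (fun x => ((del.getD x PySem.Set.empty).length : Int))).sum ∧
    ∀ x0 : Int,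
      (xs.foldl (fun st x =>
        let ys : PySem.Set Int := del.getD x PySem.Set.empty
        let marked := ys.foldl (fun col y => PySem.List.pySetD col y '?') (st.2.getD x [])
        let fcol := marked.filter (fun k => k != '?')
        let newcol := (List.range ys.length).foldl (fun col _ => PySem.List.insert col 0 ' ') fcol
        (st.1 + (ys.length : Int), st.2.insert x newcol)) (ans, d)).2.getD x0 []
      = if x0 ∈ xs then
          (List.range (del.getD x0 PySem.Set.empty).length).foldl (fun col _ => PySem.List.insert col 0 ' ')
            (((del.getD x0 PySem.Set.empty).foldl (fun col y => PySem.List.pySetD col y '?')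
                (d.getD x0 [])).filter (fun k => k != '?'))
        else d.getD x0 [] := by
  intro xs
  induction xs with
  | nil =>
    intro _ ans d
    refine ⟨by simp, fun x0 => by simp⟩
  | cons a as ih =>
    intro hnd ans d
    rw [List.nodup_cons] at hnd
    simp only [List.foldl_cons]
    obtain ⟨ih1, ih2⟩ := ih hnd.2 (ans + ((del.getD a PySem.Set.empty).length : Int))
      (d.insert a ((List.range (del.getD a PySem.Set.empty).length).foldl
        (fun col _ => PySem.List.insert col 0 ' ')
        (((del.getD a PySem.Set.empty).foldl (fun col y => PySem.List.pySetD col y '?')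
            (d.getD a [])).filter (fun k => k != '?'))))
    constructor
    · rw [ih1, List.map_cons, List.sum_cons]
      ring
    · intro x0
      rw [ih2 x0]
      by_cases h1 : x0 ∈ as
      · have hx0a : x0 ≠ a := fun he => hnd.1 (he ▸ h1)
        rw [if_pos h1, if_pos (List.mem_cons_of_mem _ h1)]
        rw [PySem.Dict.getD_insert_of_ne _ _ _ hx0a]
      · rw [if_neg h1]
        by_cases h2 : x0 = a
        · rw [if_pos (h2 ▸ List.mem_cons_self), h2, PySem.Dict.getD_insert_self]
        · rw [if_neg (by simp [List.mem_cons, h1, h2]), PySem.Dict.getD_insert_of_ne _ _ _ h2]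

-- B's pass fold, characterized
theorem pvPassB_fold (m n : Int) (g : List (List Char)) :
    ∀ (xs : List Int) (st : Int × List (List Char)),
    xs.foldl (fun st c =>
      let kept := pvKeepB m n g c
      (st.1 + ((g.length - kept.length : Nat) : Int),
       st.2 ++ [List.replicate (g.length - kept.length) ' ' ++ kept])) st
    = (st.1 + ((xs.map (fun c => g.length - (pvKeepB m n g c).length)).sum : Int),
       st.2 ++ xs.map (fun c => List.replicate (g.length - (pvKeepB m n g c).length) ' ' ++ pvKeepB m n g c)) := by
  intro xs
  induction xs with
  | nil => intro st; simp
  | cons a as ih =>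
    intro st
    simp only [List.foldl_cons, ih, List.map_cons, List.sum_cons]
    refine Prod.ext ?_ ?_
    · simp only []
      push_cast
      ring
    · simp

-- the rebuilt grid's columns are exactly the new columns
theorem pvRebuild_col (n : Int) (h : Nat) (cols : List (List Char))
    (hlen : cols.length = n.toNat)
    (hcl : ∀ j : Nat, j < cols.length → (cols.getD j []).length = h)
    (x : Int) (hx0 : 0 ≤ x) (hxn : x < n) :
    pvColAt (pvRebuildB n h cols) x = cols.getD x.toNat [] := by
  unfold pvColAt pvRebuildB
  rw [List.map_map]
  have hstep : ∀ r : Nat,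
      PySem.List.pyGetD ((PySem.List.pyRange 0 n 1).map
        (fun c => PySem.List.pyGetD (PySem.List.pyGetD cols c []) (r : Int) ' ')) x ' '
      = PySem.List.pyGetD (cols.getD x.toNat []) (r : Int) ' ' := by
    intro r
    rw [PySem.List.pyGetD_map_pyRange_of_nonneg _ _ _ _ hx0 hxn]
    rw [show PySem.List.pyGetD cols x [] = cols.getD x.toNat [] by
      rw [← Int.toNat_of_nonneg hx0, PySem.List.pyGetD_natCast]
      simp only [List.getD]
      have hmx : (max x 0).toNat = x.toNat := by omega
      simp [hmx]]
  have hxl : x.toNat < cols.length := by omega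
  have hcx : (cols.getD x.toNat []).length = h := hcl x.toNat hxl
  apply List.ext_getElem
  · simpa [List.getD] using hcx.symm
  · intro i h1 h2
    simp only [List.getElem_map, Function.comp, List.getElem_range]
    rw [hstep i]
    rw [PySem.List.pyGetD_natCast]
    have hih : i < (cols.getD x.toNat []).length := by simpa using h2
    rw [List.getD_eq_getElem _ _ hih]

-- B's kept chars come from the old column (for '?'-freeness)
theorem pvKeepB_mem (m n : Int) (g : List (List Char)) (c : Int) :
    ∀ ch ∈ pvKeepB m n g c, ch ∈ pvColAt g c := by
  intro ch hch
  unfold pvKeepB at hch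
  rw [List.mem_map] at hch
  obtain ⟨r, hr, rfl⟩ := hch
  rw [List.mem_filter, List.mem_range] at hr
  rw [← pvColAt_get g c (r : Int), PySem.List.pyGetD_natCast]
  have : r < (pvColAt g c).length := by rw [pvColAt, List.length_map]; exact hr.1
  rw [List.getD_eq_getElem _ _ this]
  exact List.getElem_mem _

-- the full cascade step: A's mark+clear vs B's pass+rebuild
theorem pvStep_eq (m n : Int) (h : Nat) (ans : Int)
    (nb : PySem.Dict Int (List Char)) (g : List (List Char))
    (hce : pvColEq n nb g) (hg : pvGood m n h g) :
    ((pvMarkA m n nb).items = [] ↔ (pvPassB m n g).1 = 0) ∧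
    ((pvMarkA m n nb).items ≠ [] →
      (pvClearA n (pvMarkA m n nb) (ans, nb)).1 = ans + (pvPassB m n g).1 ∧
      pvColEq n (pvClearA n (pvMarkA m n nb) (ans, nb)).2 (pvRebuildB n g.length (pvPassB m n g).2) ∧
      pvGood m n h (pvRebuildB n g.length (pvPassB m n g).2)) := by
  obtain ⟨hinv, hmemA⟩ := pvMark_char m n nb
  set del := pvMarkA m n nb with hdel
  have hmem : ∀ y x : Int, y ∈ del.getD x PySem.Set.empty ↔ pvClearedB m n g y x = true := by
    intro y x
    rw [hmemA y x, pvCleared_eq m n nb g hce y x]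
  obtain ⟨hlen, hmh, hrl, hnoq⟩ := hg
  have hpass := pvPassB_fold m n g (PySem.List.pyRange 0 n 1) ((0 : Int), ([] : List (List Char)))
  have hpassk : (pvPassB m n g).1
      = (((PySem.List.pyRange 0 n 1).map (fun c => g.length - (pvKeepB m n g c).length)).sum : Int) := by
    unfold pvPassB
    rw [hpass]
    simp
  have hpasscols : (pvPassB m n g).2
      = (PySem.List.pyRange 0 n 1).map
          (fun c => List.replicate (g.length - (pvKeepB m n g c).length) ' ' ++ pvKeepB m n g c) := by
    unfold pvPassB
    rw [hpass]
    simp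
  -- per-column facts for in-range columns
  have hcolfact : ∀ x : Int, 0 ≤ x → x < n →
      ((del.getD x PySem.Set.empty).length : Int) = ((h - (pvKeepB m n g x).length : Nat) : Int) ∧
      (List.range (del.getD x PySem.Set.empty).length).foldl (fun col _ => PySem.List.insert col 0 ' ')
        (((del.getD x PySem.Set.empty).foldl (fun col y => PySem.List.pySetD col y '?')
            (pvColAt g x)).filter (fun k => k != '?'))
      = List.replicate (h - (pvKeepB m n g x).length) ' ' ++ pvKeepB m n g x :=
    fun x hx0 hxn => pvNewColA m n h del g hmem hinv ⟨hlen, hmh, hrl, hnoq⟩ x hx0 hxn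
  have hkle : ∀ c : Int, (pvKeepB m n g c).length ≤ g.length := by
    intro c
    unfold pvKeepB
    rw [List.length_map]
    calc ((List.range g.length).filter _).length ≤ (List.range g.length).length :=
          List.length_filter_le _ _
      _ = g.length := List.length_range
  -- emptiness ↔ k = 0
  have hempk : (del.items = [] ↔ (pvPassB m n g).1 = 0) := by
    rw [hpassk]
    have hsum0 : (((PySem.List.pyRange 0 n 1).map (fun c => g.length - (pvKeepB m n g c).length)).sum : Int) = 0
        ↔ ∀ c ∈ PySem.List.pyRange 0 n 1, g.length - (pvKeepB m n g c).length = 0 := by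
      rw [Int.natCast_eq_zero, List.sum_eq_zero_iff]
      constructor
      · intro hz c hc
        exact hz _ (List.mem_map.mpr ⟨c, hc, rfl⟩)
      · intro hz t ht
        rw [List.mem_map] at ht
        obtain ⟨c, hc, rfl⟩ := ht
        exact hz c hc
    rw [hsum0]
    rw [hinv.2.2]
    constructor
    · intro hnone c hc
      have hcb := PySem.List.mem_pyRange_one.mp hc
      have := (hcolfact c hcb.1 hcb.2).1
      have hzero : (del.getD c PySem.Set.empty).length = 0 := by
        rw [List.length_eq_zero_iff]
        by_contra hne
        obtain ⟨y, hy⟩ := List.exists_mem_of_ne_nil _ hne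
        exact hnone y c hy
      omega
    · intro hall y x hyx
      have hbd := hinv.2.1 y x hyx
      have hc : x ∈ PySem.List.pyRange 0 n 1 := PySem.List.mem_pyRange_one.mpr ⟨by omega, by omega⟩
      have hz := hall x hc
      have := (hcolfact x (by omega) (by omega)).1
      have hlp : (del.getD x PySem.Set.empty).length = 0 := by omega
      rw [List.length_eq_zero_iff] at hlp
      rw [hlp] at hyx
      exact absurd hyx (List.not_mem_nil)
  refine ⟨hempk, fun _ => ?_⟩
  obtain ⟨hA1, hA2⟩ := pvClearA_char n del (PySem.List.pyRange 0 n 1) (PySem.List.nodup_pyRange_one 0 n) ans nb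
  have hsum : (List.map (fun x => ((del.getD x PySem.Set.empty).length : Int)) (PySem.List.pyRange 0 n 1)).sum
      = ((List.map (fun c => g.length - (pvKeepB m n g c).length) (PySem.List.pyRange 0 n 1)).sum : Int) := by
    rw [Nat.cast_list_sum, List.map_map]
    apply congrArg List.sum
    apply List.map_congr_left
    intro c hc
    have hcb := PySem.List.mem_pyRange_one.mp hc
    have := (hcolfact c hcb.1 hcb.2).1
    simp only [Function.comp]
    rw [this, hlen]
  have hclear1 : (pvClearA n del (ans, nb)).1 = ans + (pvPassB m n g).1 := by
    unfold pvClearA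
    rw [hA1, hpassk, hsum]
  -- the new columns list, looked up
  have hcolget : ∀ x : Int, 0 ≤ x → x < n →
      ((pvPassB m n g).2).getD x.toNat []
        = List.replicate (g.length - (pvKeepB m n g x).length) ' ' ++ pvKeepB m n g x := by
    intro x hx0 hxn
    rw [hpasscols, PySem.List.pyRange_one 0 n, List.map_map]
    have hxl : x.toNat < (n - 0).toNat := by omega
    rw [List.getD_eq_getElem _ _ (by simpa using hxl)]
    simp only [List.getElem_map, List.getElem_range, Function.comp]
    have hz : (0 : Int) + (x.toNat : Int) = x := by omega
    rw [hz]
  have hcols_len : ((pvPassB m n g).2).length = n.toNat := by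
    rw [hpasscols, List.length_map, PySem.List.length_pyRange_one]
    omega
  have hcols_each : ∀ j : Nat, j < ((pvPassB m n g).2).length →
      (((pvPassB m n g).2).getD j []).length = h := by
    intro j hj
    rw [hpasscols] at hj ⊢
    rw [List.getD_eq_getElem _ _ hj, List.getElem_map, List.length_append, List.length_replicate]
    rw [Nat.sub_add_cancel (hkle _)]
    exact hlen
  have hreb : ∀ x : Int, 0 ≤ x → x < n →
      pvColAt (pvRebuildB n g.length (pvPassB m n g).2) x
        = List.replicate (h - (pvKeepB m n g x).length) ' ' ++ pvKeepB m n g x := by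
    intro x hx0 hxn
    rw [hlen]
    rw [pvRebuild_col n h ((pvPassB m n g).2) hcols_len hcols_each x hx0 hxn]
    rw [hcolget x hx0 hxn, hlen]
  refine ⟨hclear1, ?_, ?_⟩
  · intro x hx0 hxn
    unfold pvClearA
    rw [hA2 x, if_pos (PySem.List.mem_pyRange_one.mpr ⟨hx0, hxn⟩)]
    rw [show nb.getD x [] = pvColAt g x from hce x hx0 hxn]
    rw [(hcolfact x hx0 hxn).2, hreb x hx0 hxn]
  · refine ⟨?_, hmh, ?_, ?_⟩
    · unfold pvRebuildB
      rw [List.length_map, List.length_range, hlen]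
    · intro row hrow
      unfold pvRebuildB at hrow
      rw [List.mem_map] at hrow
      obtain ⟨r, _, rfl⟩ := hrow
      rw [List.length_map, PySem.List.length_pyRange_one]
      omega
    · intro x hx0 hxn hq
      rw [hreb x hx0 hxn] at hq
      rcases List.mem_append.mp hq with hl | hl
      · exact absurd (List.eq_of_mem_replicate hl) (by decide)
      · exact hnoq x hx0 hxn (pvKeepB_mem m n g x _ hl)

-- degenerate boards (m ≤ 1 or n ≤ 1): A marks nothing
theorem pvMark_degenerate (m n : Int) (hdeg : m ≤ 1 ∨ n ≤ 1)
    (nb : PySem.Dict Int (List Char)) : pvMarkA m n nb = PySem.Dict.empty := by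
  rcases hdeg with hm | hn
  · have h1 : PySem.List.pyRange 0 (m-1) 1 = [] := PySem.List.pyRange_one_eq_nil (by omega)
    simp [pvMarkA, h1]
  · have h1 : PySem.List.pyRange 0 (n-1) 1 = [] := PySem.List.pyRange_one_eq_nil (by omega)
    simp [pvMarkA, h1]

-- degenerate boards: B clears nothing in a pass
theorem pvPass_degenerate (m n : Int) (hdeg : m ≤ 1 ∨ n ≤ 1)
    (g : List (List Char)) : (pvPassB m n g).1 = 0 := by
  have hblock : ∀ r c : Int, pvBlockB m n g r c = false := by
    intro r c
    unfold pvBlockB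
    split
    · rfl
    · rename_i hcond
      simp only [Bool.or_eq_true, decide_eq_true_eq, not_or] at hcond
      exfalso; omega
  have hclr : ∀ r c : Int, pvClearedB m n g r c = false := by
    intro r c
    simp [pvClearedB, hblock]
  have hkeep : ∀ c : Int, (pvKeepB m n g c).length = g.length := by
    intro c
    unfold pvKeepB
    rw [List.length_map]
    rw [List.filter_congr (q := fun _ => true) (fun r _ => by simp [hclr])]
    simp
  unfold pvPassB
  rw [pvPassB_fold m n g]
  simp only []
  rw [show (0 : Int) + ((List.map (fun c => g.length - (pvKeepB m n g c).length) (PySem.List.pyRange 0 n 1)).sum : Int)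
      = ((List.map (fun c => g.length - (pvKeepB m n g c).length) (PySem.List.pyRange 0 n 1)).sum : Int) by ring]
  rw [Int.natCast_eq_zero, List.sum_eq_zero_iff]
  intro t ht
  rw [List.mem_map] at ht
  obtain ⟨c, _, rfl⟩ := ht
  rw [hkeep c]
  omega

-- the whole cascade: A's loop with accumulator = accumulator + B's pure recursion
theorem pvLoop_eq (m n : Int) (h : Nat) (fuel : Nat) :
    ∀ (ans : Int) (nb : PySem.Dict Int (List Char)) (g : List (List Char)),
    pvColEq n nb g → pvGood m n h g →
    pvLoopA m n fuel ans nb = ans + pvCascadeB m n fuel g := by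
  induction fuel with
  | zero => intro ans nb g _ _; simp [pvLoopA, pvCascadeB]
  | succ fuel ih =>
    intro ans nb g hce hg
    obtain ⟨hempk, hrest⟩ := pvStep_eq m n h ans nb g hce hg
    simp only [pvLoopA, pvCascadeB]
    by_cases hd : (pvMarkA m n nb).items = []
    · rw [if_pos hd, if_pos (hempk.mp hd)]
      ring
    · have hk : ¬ (pvPassB m n g).1 = 0 := fun hz => hd (hempk.mpr hz)
      rw [if_neg hd, if_neg hk]
      obtain ⟨h1, h2, h3⟩ := hrest hd
      rw [h1] at *
      rw [ih _ _ _ h2 h3]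
      ring

-- A's transposed dict column, explicitly
theorem pvBuild_inner (x : Int) : ∀ (board : List String) (d : PySem.Dict Int (List Char)), board ≠ [] →
    board.foldl (fun d b => d.insert x ((d.getD x []) ++ [PySem.List.pyGetD b.toList x ' '])) d
    = d.insert x ((d.getD x []) ++ board.map (fun b => PySem.List.pyGetD b.toList x ' ')) := by
  intro board
  induction board with
  | nil => simp
  | cons b bs ih =>
    intro d _
    by_cases hbs : bs = []
    · subst hbs; simp
    · rw [List.foldl_cons, ih _ hbs, PySem.Dict.getD_insert_self, PySem.Dict.insert_insert_self]
      simp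

theorem pvFoldIns_getD (col : Int → List Char) (x : Int) :
    ∀ (xs : List Int) (d : PySem.Dict Int (List Char)), xs.Nodup →
    ((x ∈ xs → (xs.foldl (fun d k => d.insert k (d.getD k [] ++ col k)) d).getD x []
        = d.getD x [] ++ col x) ∧
     (x ∉ xs → (xs.foldl (fun d k => d.insert k (d.getD k [] ++ col k)) d).getD x []
        = d.getD x [])) := by
  intro xs
  induction xs with
  | nil => intro d _; simp
  | cons a as ih =>
    intro d hnd
    rw [List.nodup_cons] at hnd
    simp only [List.foldl_cons]
    set d1 := d.insert a ((d.getD a []) ++ col a) with hd1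
    constructor
    · intro hx
      by_cases hxa : x = a
      · subst hxa
        rw [(ih d1 hnd.2).2 hnd.1, hd1, PySem.Dict.getD_insert_self]
      · have hx' : x ∈ as := by
          rcases List.mem_cons.mp hx with h | h
          · exact absurd h hxa
          · exact h
        rw [(ih d1 hnd.2).1 hx', hd1, PySem.Dict.getD_insert_of_ne _ _ _ hxa]
    · intro hx
      have hxa : x ≠ a := fun h => hx (h ▸ List.mem_cons_self)
      have hx' : x ∉ as := fun h => hx (List.mem_cons_of_mem _ h)
      rw [(ih d1 hnd.2).2 hx', hd1, PySem.Dict.getD_insert_of_ne _ _ _ hxa]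

theorem pvBuild_getD (n : Int) (board : List String) (hb : board ≠ [])
    (x : Int) (hx0 : 0 ≤ x) (hxn : x < n) :
    (pvBuildA n board).getD x [] = board.map (fun b => PySem.List.pyGetD b.toList x ' ') := by
  have hstep : ∀ (d : PySem.Dict Int (List Char)) (k : Int),
      board.foldl (fun d b => d.insert k ((d.getD k []) ++ [PySem.List.pyGetD b.toList k ' '])) d
      = d.insert k ((d.getD k []) ++ board.map (fun b => PySem.List.pyGetD b.toList k ' ')) :=
    fun d k => pvBuild_inner k board d hb
  have h := (pvFoldIns_getD (fun k => board.map (fun b => PySem.List.pyGetD b.toList k ' ')) x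
      (PySem.List.pyRange 0 n 1) PySem.Dict.empty (PySem.List.nodup_pyRange_one 0 n)).1
      (PySem.List.mem_pyRange_one.mpr ⟨hx0, hxn⟩)
  unfold pvBuildA
  simp only [hstep]
  simpa [PySem.Dict.getD_empty] using h

-- ===== VERDICT (by name: the statement is the Claim_ definition above) =====
set_option maxHeartbeats 1000000 in
theorem solution_spec : Claim_equal_solution := by
  intro m n board _ hpre
  unfold Spec_solution solution solution_alt
  by_cases hgood : 2 ≤ m ∧ 2 ≤ n
  · obtain ⟨hp1, hp2⟩ := hpre
    have hp2' := hp2 hgood.1 hgood.2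
    have hbne : board ≠ [] := by
      intro hb
      have hle := hp2'.1
      rw [hb] at hle
      simp at hle
      omega
    have hn0 : (0 : Int) ≤ n := by omega
    have hsl : ∀ b : String, b ∈ board →
        PySem.List.slice b.toList none (some n) = b.toList.take n.toNat := by
      intro b _
      exact PySem.List.slice_to _ hn0
    have hslget : ∀ (b : String), b ∈ board → ∀ x : Int, 0 ≤ x → x < n →
        PySem.List.pyGetD (PySem.List.slice b.toList none (some n)) x ' '
          = PySem.List.pyGetD b.toList x ' ' := by
      intro b hbm x hx0 hxn
      have hblen : n ≤ (b.toList.length : Int) := hp1 (by omega) b hbm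
      rw [hsl b hbm]
      have hxl : x.toNat < n.toNat := by omega
      have htl : (b.toList.take n.toNat).length = n.toNat := by
        rw [List.length_take]
        omega
      rw [PySem.List.pyGetD_eq_getElem _ ' ' hx0 (by rw [htl]; omega)]
      rw [PySem.List.pyGetD_eq_getElem _ ' ' hx0 (by omega)]
      rw [List.getElem_take]
    have hceI : pvColEq n (pvBuildA n board)
        (board.map (fun row => PySem.List.slice row.toList none (some n))) := by
      intro x hx0 hxn
      rw [pvBuild_getD n board hbne x hx0 hxn]
      unfold pvColAt
      rw [List.map_map]
      apply List.map_congr_left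
      intro b hbm
      exact (hslget b hbm x hx0 hxn).symm
    have hgoodI : pvGood m n board.length
        (board.map (fun row => PySem.List.slice row.toList none (some n))) := by
      refine ⟨by simp, hp2'.1, ?_, ?_⟩
      · intro row hrme
        rw [List.mem_map] at hrme
        obtain ⟨b, hbm, rfl⟩ := hrme
        rw [hsl b hbm, List.length_take]
        have hblen : n ≤ (b.toList.length : Int) := hp1 (by omega) b hbm
        have : min n.toNat b.toList.length = n.toNat := by omega
        rw [this]
        omega
      · intro x hx0 hxn hqm
        unfold pvColAt at hqm
        rw [List.map_map, List.mem_map] at hqm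
        obtain ⟨b, hbm, hbe⟩ := hqm
        have hblen : n ≤ (b.toList.length : Int) := hp1 (by omega) b hbm
        simp only [Function.comp] at hbe
        rw [hslget b hbm x hx0 hxn] at hbe
        have hmemb : PySem.List.pyGetD b.toList x ' ' ∈ b.toList := by
          rw [PySem.List.pyGetD_eq_getElem _ ' ' hx0 (by omega)]
          exact List.getElem_mem _
        exact hp2'.2 b hbm (hbe ▸ hmemb)
    have hloop := pvLoop_eq m n board.length (board.length * n.toNat + 1) 0 (pvBuildA n board)
        (board.map (fun row => PySem.List.slice row.toList none (some n)))
    have hloop2 := hloop hceI hgoodI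
    omega
  · have hdeg : m ≤ 1 ∨ n ≤ 1 := by omega
    have hA := pvMark_degenerate m n hdeg (pvBuildA n board)
    have hB := pvPass_degenerate m n hdeg (board.map (fun row => PySem.List.slice row.toList none (some n)))
    simp only [pvLoopA, pvCascadeB, hA]
    rw [if_pos (show (PySem.Dict.empty : PySem.Dict Int (PySem.Set Int)).items = [] from rfl)]
    rw [if_pos hB]
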